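-- pv_equiv track=rewrite | github.com/yeoneed/Algorithm_byme | SWEA/hw/swea_sf_2.py | is_valid_tc
-- ===== SOURCE A (Python) =====
-- def is_valid_tc(n,tc):
--     tmp = [0 for _ in range(n)]
--     if n==1:
--             return 0
--
--     for i in range(n): #주어진 값이 홀수라면 1을, 짝수라면 -1로 변환해 tmp에 넣음
--         if tc[i]%2==1:
--             tmp[i]= 1
--         else:
--             tmp[i]=-1
--
--     if n%2==0: #주어진 리스트의 길이가 짝수일 때
--         if sum(tmp)!=0: #tmp의 합이 0이 아니면(짝수나 홀수의 개수가 많으면 안되므로)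
--             return -1   #-1 return
--     else: #주어진 리스트의 길이가 홀수일 때
--         if abs(sum(tmp))!=1: #짝수와 홀수의 개수가 1개 넘게 차이나면 -1 return
--             return -1
--
--     return(solve(n, tc, tmp))#정상적인 리스트면 solve함수에 넣기
--
-- def solve(n, tc, tmp):
--     cnt = 0
--     base= [0 for _ in range(n)]
--
--     if n%2==0: #리스트 길이 짝수면서
--         if tmp[0]==1: #첫번째 숫자가 홀수면 정답 리스트(base)홀짝홀짝홀짝 이런식으로 돼야함
--             for i in range(n):
--                 if i%2==0:
--                     base[i]=1 #홀수면 1을 넣고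
--                 else:
--                     base[i] = -1 #짝수면 -1을 넣음
--         else: #리스트 길이 짝수면서 첫번째 숫자가 짝수일 경우
--             for i in range(n):
--                 if i%2==0:
--                     base[i]=-1 #정답 리스트(base)는 짝홀짝홀짝홀 이런식으로 돼야함
--                 else:
--                     base[i] =1
--     else: #길이 홀수일 때
--         if sum(tmp)==1: #홀수 더 많을 경우 1부터(첫번째 숫자 홀수여야 함) 시작해야 하므로
--             for i in range(n):
--                 if i%2==0:
--                     base[i]=1 #base는 홀짝홀짝홀 이런식
--                 else:
--                     base[i] = -1
--         else:
--             for i in range(n): #짝수 더 많을 경우 -1(첫번째 숫자 짝수로) 부터 시작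
--                 if i%2==0:
--                     base[i]=-1 #base는 짝홀짝홀짝홀 이런식
--                 else:
--                     base[i] =1
--
--     for k in range(n):
--         if tmp[k]!=base[k]: #테스트 케이스 짝홀 여부랑 정답 리스트 짝홀 여부 다른 경우: cnt 증가
--             cnt+=1
--
--     return cnt//2 #두 숫자를 '교환'하는 횟수 구하므로 cnt//2 해줌
-- ===== SOURCE B (Python) =====
-- def is_valid_tc(n, tc):
--     # Count odds (o) and odds sitting at even indices (oe) in one pass; the answer is
--     # the number of MISPLACED ODD elements, read off arithmetically from these counters.
--     if n == 1:
--         return 0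
--     o = oe = t = 0
--     for i in range(n):
--         t += 1
--         if tc[i] % 2 == 1:
--             o += 1
--             if i % 2 == 0:
--                 oe += 1
--     e = t - o
--     if n % 2 == 0:
--         if o != e:
--             return -1
--         return o - oe if tc[0] % 2 == 1 else oe
--     else:
--         if abs(o - e) != 1:
--             return -1
--         return o - oe if o > e else oe
-- ===== Notes on version B (the rewrite author's own statement) =====
-- stated objective: simpler
-- what changed: B abandons A's build-sign-array / build-target-pattern-array / count-mismatches-and-halve pipeline (tmp, base, solve, cnt//2): it maintains two counters in one pass (odd values, odd values at even indices) and returns the answer as a closed arithmetic expression in them -- the number of misplaced odd elements -- with feasibility checked as a counter comparison.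
import Mathlib
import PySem

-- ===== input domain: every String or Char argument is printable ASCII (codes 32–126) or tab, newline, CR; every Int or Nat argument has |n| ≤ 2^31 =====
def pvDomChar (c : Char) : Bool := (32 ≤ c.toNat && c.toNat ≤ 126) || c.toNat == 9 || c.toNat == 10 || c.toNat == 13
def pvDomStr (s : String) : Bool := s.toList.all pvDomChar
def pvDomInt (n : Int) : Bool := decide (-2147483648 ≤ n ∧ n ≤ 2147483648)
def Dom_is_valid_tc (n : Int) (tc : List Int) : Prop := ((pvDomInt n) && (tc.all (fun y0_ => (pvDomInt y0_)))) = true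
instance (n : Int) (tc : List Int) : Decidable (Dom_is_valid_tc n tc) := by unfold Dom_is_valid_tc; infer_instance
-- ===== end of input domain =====

-- B replaces A's pattern-building and mismatch-counting (tmp, base, solve, cnt//2) by one
-- counting pass (odds, odds at even indices) and a closed arithmetic answer: the number of
-- misplaced odd elements (objective: simpler, same O(n) cost).

-- ===== PORT A =====
-- solve(n, tc, tmp): builds base by assigning into a preallocated zero list, then counts
-- mismatches tmp[k] != base[k].  The index reads tmp[0], tmp[k], base[k] are ported with
-- pyGetD _ _ 0: exact, since every such read is in range on the inputs Pre_ admits.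
def solveA (n : Int) (_tc : List Int) (tmp : List Int) : Int :=
  let base0 : List Int := (PySem.List.pyRange 0 n 1).map (fun _ => 0)
  let base : List Int :=
    if PySem.Int.mod n 2 = 0 then
      if PySem.List.pyGetD tmp 0 0 = 1 then
        (PySem.List.pyRange 0 n 1).foldl
          (fun b i => b.set i.toNat (if PySem.Int.mod i 2 = 0 then 1 else -1)) base0
      else
        (PySem.List.pyRange 0 n 1).foldl
          (fun b i => b.set i.toNat (if PySem.Int.mod i 2 = 0 then -1 else 1)) base0
    else
      if tmp.sum = 1 then
        (PySem.List.pyRange 0 n 1).foldl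
          (fun b i => b.set i.toNat (if PySem.Int.mod i 2 = 0 then 1 else -1)) base0
      else
        (PySem.List.pyRange 0 n 1).foldl
          (fun b i => b.set i.toNat (if PySem.Int.mod i 2 = 0 then -1 else 1)) base0
  let cnt : Int := (PySem.List.pyRange 0 n 1).foldl
      (fun c k => if PySem.List.pyGetD tmp k 0 ≠ PySem.List.pyGetD base k 0 then c + 1 else c) 0
  PySem.Int.floordiv cnt 2

-- tmp[i] = ±1 assignment into the preallocated zero list; i.toNat is exact since i ∈ range(n)
-- is nonnegative, and tc[i] is in range on the inputs Pre_ admits.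
def is_valid_tc (n : Int) (tc : List Int) : Int :=
  let tmp0 : List Int := (PySem.List.pyRange 0 n 1).map (fun _ => 0)
  if n = 1 then 0
  else
    let tmp := (PySem.List.pyRange 0 n 1).foldl
        (fun t i => t.set i.toNat
          (if PySem.Int.mod (PySem.List.pyGetD tc i 0) 2 = 1 then 1 else -1)) tmp0
    if PySem.Int.mod n 2 = 0 then
      if tmp.sum ≠ 0 then -1 else solveA n tc tmp
    else
      if |tmp.sum| ≠ 1 then -1 else solveA n tc tmp

-- ===== PORT B =====
-- one pass accumulating (o, oe, t) = (#odd values, #odd values at even indices, #iterations)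
def is_valid_tc_alt (n : Int) (tc : List Int) : Int :=
  if n = 1 then 0
  else
    let r : Int × Int × Int := (PySem.List.pyRange 0 n 1).foldl
      (fun (s : Int × Int × Int) i =>
        if PySem.Int.mod (PySem.List.pyGetD tc i 0) 2 = 1 then
          (s.1 + 1, (if PySem.Int.mod i 2 = 0 then s.2.1 + 1 else s.2.1), s.2.2 + 1)
        else (s.1, s.2.1, s.2.2 + 1)) (0, 0, 0)
    let o := r.1
    let oe := r.2.1
    let e := r.2.2 - r.1
    if PySem.Int.mod n 2 = 0 then
      if o ≠ e then -1
      else if PySem.Int.mod (PySem.List.pyGetD tc 0 0) 2 = 1 then o - oe else oe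
    else
      if |o - e| ≠ 1 then -1
      else if o > e then o - oe else oe

-- ===== PRECONDITION & SPEC =====
-- A raises IndexError outside this set: for n ≥ 2 it reads tc[0..n-1] (so n ≤ len(tc) is
-- needed), and for even n ≤ 0 solve reads tmp[0] of the empty tmp list.
def Pre_is_valid_tc (n : Int) (tc : List Int) : Prop :=
  n = 1 ∨ (n ≤ 0 ∧ PySem.Int.mod n 2 = 1) ∨ (2 ≤ n ∧ n ≤ tc.length)
instance (n : Int) (tc : List Int) : Decidable (Pre_is_valid_tc n tc) := by
  unfold Pre_is_valid_tc; infer_instance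

def pvWitness_is_valid_tc : Int × List Int := (4, [2, 1, 4, 3])

def Spec_is_valid_tc (n : Int) (tc : List Int) (out : Int) : Prop := out = is_valid_tc_alt n tc
instance (n : Int) (tc : List Int) (out : Int) : Decidable (Spec_is_valid_tc n tc out) := by
  unfold Spec_is_valid_tc; infer_instance

-- ===== CLAIM (what is proved, stated in full; the proofs are below) =====
def Claim_equal_is_valid_tc : Prop := ∀ (n : Int) (tc : List Int),
  Dom_is_valid_tc n tc → Pre_is_valid_tc n tc → Spec_is_valid_tc n tc (is_valid_tc n tc)

-- ===== LEMMAS AND PROOFS =====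

-- the ±1 sign A stores in tmp[i]
def fsgn (tc : List Int) (i : Int) : Int :=
  if PySem.Int.mod (PySem.List.pyGetD tc i 0) 2 = 1 then 1 else -1
-- Bool predicates for the counters B maintains
def isOddV (tc : List Int) (i : Int) : Bool :=
  decide (PySem.Int.mod (PySem.List.pyGetD tc i 0) 2 = 1)
def isEvI (i : Int) : Bool := decide (PySem.Int.mod i 2 = 0)

-- Filling a preallocated zero list of length m position-by-position over range(0, k), k ≤ m.
theorem fill_aux (f : Int → Int) (m : Nat) : ∀ k : Nat, k ≤ m →
    (PySem.List.pyRange 0 (k:Int) 1).foldl (fun t i => t.set i.toNat (f i)) (List.replicate m 0)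
    = (PySem.List.pyRange 0 (k:Int) 1).map f ++ List.replicate (m - k) 0 := by
  intro k
  induction k with
  | zero =>
    intro _
    simp [PySem.List.pyRange_one_eq_nil (by omega : (0:Int) ≤ 0)]
  | succ k ih =>
    intro hk
    rw [show ((k+1:Nat):Int) = (k:Int)+1 by push_cast; ring,
        PySem.List.pyRange_one_succ_right (by positivity : (0:Int) ≤ (k:Int)),
        List.foldl_append, ih (by omega)]
    simp only [List.foldl_cons, List.foldl_nil]
    rw [List.set_append]
    have hlen : ((PySem.List.pyRange 0 (k:Int) 1).map f).length = k := by
      simp [PySem.List.length_pyRange_one]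
    have hmk : m - k = (m - (k+1)) + 1 := by omega
    rw [hlen, hmk, List.replicate_succ]
    simp [List.map_append]

-- The 'for i in range(n): xs[i] = f(i)' loop over the preallocated zero list is the map.
theorem fill_eq_map (n : Int) (f : Int → Int) :
    (PySem.List.pyRange 0 n 1).foldl (fun t i => t.set i.toNat (f i))
      ((PySem.List.pyRange 0 n 1).map (fun _ => 0)) = (PySem.List.pyRange 0 n 1).map f := by
  rcases (by omega : n ≤ 0 ∨ 0 < n) with h | h
  · simp [PySem.List.pyRange_one_eq_nil h]
  · have hz : (PySem.List.pyRange 0 n 1).map (fun _ => (0:Int)) = List.replicate n.toNat 0 := by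
      rw [show (fun _ : Int => (0:Int)) = Function.const Int (0:Int) from rfl, List.map_const]
      simp [PySem.List.length_pyRange_one]
    have hn : ((n.toNat : Nat) : Int) = n := Int.toNat_of_nonneg (le_of_lt h)
    rw [hz]
    have := fill_aux f n.toNat n.toNat (le_refl _)
    rw [hn] at this
    simp at this
    simpa using this

-- A's mismatch-counting loop over two mapped ranges is a filter length.
theorem cnt_eq (n : Int) (u v : Int → Int) :
    (PySem.List.pyRange 0 n 1).foldl (fun c k =>
      if PySem.List.pyGetD ((PySem.List.pyRange 0 n 1).map u) k 0 ≠
         PySem.List.pyGetD ((PySem.List.pyRange 0 n 1).map v) k 0 then c + 1 else c) (0:Int)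
    = (((PySem.List.pyRange 0 n 1)).filter (fun i => u i ≠ v i)).length := by
  rw [PySem.List.foldl_congr_mem _ _
      (fun (c : Int) (k : Int) => if u k ≠ v k then c + 1 else c) 0
      (by
        intro acc x hx
        rw [PySem.List.mem_pyRange_one] at hx
        rw [PySem.List.pyGetD_map_pyRange_of_nonneg u n x 0 hx.1 hx.2,
            PySem.List.pyGetD_map_pyRange_of_nonneg v n x 0 hx.1 hx.2])]
  rw [show (fun (c : Int) (k : Int) => if u k ≠ v k then c + 1 else c)
        = (fun (c : Int) (k : Int) => if (fun i => decide (u i ≠ v i)) k = true then c + 1 else c) by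
      funext c k; simp]
  rw [PySem.List.foldl_count_if]
  simp [List.countP_eq_length_filter]

-- solveA on tmp = map (fsgn tc) (range n) equals the filter-length mismatch count against
-- the alternating pattern (s at even indices) it selects, halved.
theorem solveA_eq_mism (n : Int) (tc : List Int) (s : Int)
    (hsel : (if PySem.Int.mod n 2 = 0 then
               (if PySem.List.pyGetD ((PySem.List.pyRange 0 n 1).map (fsgn tc)) 0 0 = 1
                then (1:Int) else -1)
             else (if ((PySem.List.pyRange 0 n 1).map (fsgn tc)).sum = 1 then (1:Int) else -1)) = s) :
    solveA n tc ((PySem.List.pyRange 0 n 1).map (fsgn tc))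
    = PySem.Int.floordiv
        (((PySem.List.pyRange 0 n 1).filter
          (fun i => fsgn tc i ≠ (if PySem.Int.mod i 2 = 0 then s else -s))).length) 2 := by
  unfold solveA
  have hbase : (if PySem.Int.mod n 2 = 0 then
      if PySem.List.pyGetD ((PySem.List.pyRange 0 n 1).map (fsgn tc)) 0 0 = 1 then
        (PySem.List.pyRange 0 n 1).foldl
          (fun b i => b.set i.toNat (if PySem.Int.mod i 2 = 0 then 1 else -1))
          ((PySem.List.pyRange 0 n 1).map (fun _ => 0))
      else
        (PySem.List.pyRange 0 n 1).foldl
          (fun b i => b.set i.toNat (if PySem.Int.mod i 2 = 0 then -1 else 1))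
          ((PySem.List.pyRange 0 n 1).map (fun _ => 0))
    else
      if ((PySem.List.pyRange 0 n 1).map (fsgn tc)).sum = 1 then
        (PySem.List.pyRange 0 n 1).foldl
          (fun b i => b.set i.toNat (if PySem.Int.mod i 2 = 0 then 1 else -1))
          ((PySem.List.pyRange 0 n 1).map (fun _ => 0))
      else
        (PySem.List.pyRange 0 n 1).foldl
          (fun b i => b.set i.toNat (if PySem.Int.mod i 2 = 0 then -1 else 1))
          ((PySem.List.pyRange 0 n 1).map (fun _ => 0)))
    = (PySem.List.pyRange 0 n 1).map (fun i => if PySem.Int.mod i 2 = 0 then s else -s) := by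
    split at hsel <;> split at hsel <;> rename_i hc1 hc2 <;>
      simp only [hc1, hc2, if_true, if_false] <;> rw [← hsel, fill_eq_map] <;>
      exact List.map_congr_left (fun i _ => by norm_num)
  simp only [hbase]
  rw [cnt_eq n (fsgn tc) (fun i => if PySem.Int.mod i 2 = 0 then s else -s)]

-- B's counting loop computes the three countP/length quantities (any start accumulator).
theorem foldB_eq (tc : List Int) : ∀ (L : List Int) (o oe t : Int),
    L.foldl (fun (s : Int × Int × Int) i =>
        if PySem.Int.mod (PySem.List.pyGetD tc i 0) 2 = 1 then
          (s.1 + 1, (if PySem.Int.mod i 2 = 0 then s.2.1 + 1 else s.2.1), s.2.2 + 1)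
        else (s.1, s.2.1, s.2.2 + 1)) (o, oe, t)
    = (o + (L.countP (isOddV tc) : Int),
       oe + (L.countP (fun i => isOddV tc i && isEvI i) : Int),
       t + (L.length : Int)) := by
  intro L
  induction L with
  | nil => intro o oe t; simp
  | cons x L ih =>
    intro o oe t
    simp only [List.foldl_cons]
    by_cases hx : PySem.Int.mod (PySem.List.pyGetD tc x 0) 2 = 1 <;>
      by_cases he : PySem.Int.mod x 2 = 0 <;>
      simp only [if_pos, if_neg, hx, he, ih, List.countP_cons, isOddV, isEvI,
        decide_true, decide_false, Bool.and_true, Bool.and_false, List.length_cons,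
        Prod.mk.injEq, not_false_iff] <;>
      refine ⟨by push_cast; ring, by push_cast; ring, by push_cast; ring⟩

-- sum of A's tmp in terms of B's odd counter.
theorem sum_tmp (tc : List Int) : ∀ L : List Int,
    (L.map (fsgn tc)).sum = 2 * (L.countP (isOddV tc) : Int) - L.length := by
  intro L
  induction L with
  | nil => simp
  | cons x L ih =>
    simp only [List.map_cons, List.sum_cons, List.countP_cons, List.length_cons, ih, fsgn,
      isOddV]
    by_cases hx : PySem.Int.mod (PySem.List.pyGetD tc x 0) 2 = 1 <;>
      simp only [hx, decide_true, decide_false, if_true, if_false] <;>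
      push_cast <;> ring

-- mismatch count vs the pattern starting with 1: cnt + 2·oe = ev + o  (pointwise identity)
theorem mis_one (tc : List Int) : ∀ L : List Int,
    ((L.filter (fun i => fsgn tc i ≠ (if PySem.Int.mod i 2 = 0 then (1:Int) else -1))).length : Int)
      + 2 * (L.countP (fun i => isOddV tc i && isEvI i) : Int)
    = (L.countP isEvI : Int) + (L.countP (isOddV tc) : Int) := by
  intro L
  induction L with
  | nil => simp
  | cons x L ih =>
    by_cases hx : PySem.Int.mod (PySem.List.pyGetD tc x 0) 2 = 1 <;>
    by_cases he : PySem.Int.mod x 2 = 0 <;>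
    · have hfx : fsgn tc x
          = (if PySem.Int.mod (PySem.List.pyGetD tc x 0) 2 = 1 then (1:Int) else -1) := rfl
      have hbO : isOddV tc x = decide (PySem.Int.mod (PySem.List.pyGetD tc x 0) 2 = 1) := rfl
      have hbE : isEvI x = decide (PySem.Int.mod x 2 = 0) := rfl
      simp only [List.filter_cons, List.countP_cons, hfx, hbO, hbE, hx, he]
      norm_num at ih ⊢
      omega

-- mismatch count vs the pattern starting with -1: cnt + ev + o = len + 2·oe
theorem mis_negone (tc : List Int) : ∀ L : List Int,
    ((L.filter (fun i => fsgn tc i ≠ (if PySem.Int.mod i 2 = 0 then (-1:Int) else 1))).length : Int)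
      + (L.countP isEvI : Int) + (L.countP (isOddV tc) : Int)
    = (L.length : Int) + 2 * (L.countP (fun i => isOddV tc i && isEvI i) : Int) := by
  intro L
  induction L with
  | nil => simp
  | cons x L ih =>
    by_cases hx : PySem.Int.mod (PySem.List.pyGetD tc x 0) 2 = 1 <;>
    by_cases he : PySem.Int.mod x 2 = 0 <;>
    · have hfx : fsgn tc x
          = (if PySem.Int.mod (PySem.List.pyGetD tc x 0) 2 = 1 then (1:Int) else -1) := rfl
      have hbO : isOddV tc x = decide (PySem.Int.mod (PySem.List.pyGetD tc x 0) 2 = 1) := rfl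
      have hbE : isEvI x = decide (PySem.Int.mod x 2 = 0) := rfl
      simp only [List.filter_cons, List.countP_cons, hfx, hbO, hbE, hx, he]
      norm_num at ih ⊢
      omega

-- even indices in range(k): 2·ev = k + k % 2
theorem ev_range (k : Nat) :
    2 * (((PySem.List.pyRange 0 (k:Int) 1).countP isEvI) : Int) = (k : Int) + (k % 2 : Nat) := by
  induction k with
  | zero => simp [PySem.List.pyRange_one_eq_nil (by omega : (0:Int) ≤ 0)]
  | succ k ih =>
    rw [show ((k+1:Nat):Int) = (k:Int)+1 by push_cast; ring,
        PySem.List.pyRange_one_succ_right (by positivity : (0:Int) ≤ (k:Int))]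
    rw [List.countP_append]
    have hm : PySem.Int.mod (k:Int) 2 = ((k % 2 : Nat) : Int) := by
      exact_mod_cast PySem.Int.mod_natCast k 2
    have hbE : isEvI (k:Int) = decide (PySem.Int.mod (k:Int) 2 = 0) := rfl
    by_cases hk : k % 2 = 0
    · have hd : isEvI (k:Int) = true := by rw [hbE, hm]; simp [hk]
      simp [List.countP_nil, hd]
      push_cast at ih ⊢
      omega
    · have hd : isEvI (k:Int) = false := by rw [hbE, hm]; simp; omega
      simp [List.countP_nil, hd]
      push_cast at ih ⊢
      omega

-- ===== VERDICT (by name: the statement is the Claim_ definition above) =====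
theorem is_valid_tc_spec : Claim_equal_is_valid_tc := by
  intro n tc _ hpre
  unfold Spec_is_valid_tc is_valid_tc is_valid_tc_alt
  rcases hpre with h1 | ⟨hle, hodd⟩ | ⟨h2, hlen⟩
  · subst h1; simp
  · have hne : n ≠ 1 := by omega
    have hm0 : ¬ PySem.Int.mod n 2 = 0 := by rw [hodd]; norm_num
    simp only [if_neg hne, PySem.List.pyRange_one_eq_nil hle, List.map_nil, List.foldl_nil,
               List.sum_nil, if_neg hm0]
    norm_num
  · have hne : n ≠ 1 := by omega
    have hpos : (0:Int) < n := by omega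
    have hfs : (fun i => if PySem.Int.mod (PySem.List.pyGetD tc i 0) 2 = 1 then (1:Int) else -1)
        = fsgn tc := rfl
    simp only [if_neg hne, hfs, fill_eq_map, foldB_eq tc _ 0 0 0, zero_add]
    have hlenL : ((PySem.List.pyRange 0 n 1).length : Int) = n := by
      simp [PySem.List.length_pyRange_one]; omega
    rw [hlenL, sum_tmp tc (PySem.List.pyRange 0 n 1), hlenL]
    have hev := ev_range n.toNat
    rw [show ((n.toNat : Nat) : Int) = n from Int.toNat_of_nonneg (le_of_lt hpos)] at hev
    have h0 : PySem.List.pyGetD ((PySem.List.pyRange 0 n 1).map (fsgn tc)) 0 0 = fsgn tc 0 :=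
      PySem.List.pyGetD_map_pyRange_of_nonneg (fsgn tc) n 0 0 (le_refl 0) hpos
    have hmod : PySem.Int.mod n 2 = n % 2 := PySem.Int.mod_eq_emod_of_pos (by norm_num)
    by_cases hm : PySem.Int.mod n 2 = 0
    · -- even n
      have hn2 : n % 2 = 0 := by rw [← hmod]; exact hm
      have ht2 : (n.toNat % 2 : Nat) = 0 := by omega
      rw [ht2] at hev; push_cast at hev
      rw [if_pos hm, if_pos hm]
      by_cases hz : 2 * ((PySem.List.pyRange 0 n 1).countP (isOddV tc) : Int) - n = 0
      · rw [if_neg (by omega :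
            ¬ (2 * ((PySem.List.pyRange 0 n 1).countP (isOddV tc) : Int) - n ≠ 0)),
            if_neg (by omega :
            ¬ (((PySem.List.pyRange 0 n 1).countP (isOddV tc) : Int)
               ≠ n - ((PySem.List.pyRange 0 n 1).countP (isOddV tc) : Int)))]
        by_cases hc : PySem.Int.mod (PySem.List.pyGetD tc 0 0) 2 = 1
        · have hf0 : fsgn tc 0 = 1 := by rw [fsgn]; exact if_pos hc
          rw [solveA_eq_mism n tc 1 (by rw [if_pos hm, h0, hf0]; norm_num), if_pos hc]
          have h1 := mis_one tc (PySem.List.pyRange 0 n 1)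
          have hval : (((PySem.List.pyRange 0 n 1).filter
              (fun i => fsgn tc i ≠ (if PySem.Int.mod i 2 = 0 then (1:Int) else -1))).length : Int)
              = 2 * (((PySem.List.pyRange 0 n 1).countP (isOddV tc) : Int)
                  - ((PySem.List.pyRange 0 n 1).countP (fun i => isOddV tc i && isEvI i) : Int)) := by
            omega
          rw [hval, PySem.Int.floordiv_eq_ediv_of_pos (by norm_num),
              Int.mul_ediv_cancel_left _ (by norm_num : (2:Int) ≠ 0)]
        · have hf0 : fsgn tc 0 = -1 := by rw [fsgn]; exact if_neg hc
          rw [solveA_eq_mism n tc (-1) (by rw [if_pos hm, h0, hf0]; norm_num), if_neg hc]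
          simp only [neg_neg]
          have h1 := mis_negone tc (PySem.List.pyRange 0 n 1)
          have hval : (((PySem.List.pyRange 0 n 1).filter
              (fun i => fsgn tc i ≠ (if PySem.Int.mod i 2 = 0 then (-1:Int) else 1))).length : Int)
              = 2 * ((PySem.List.pyRange 0 n 1).countP (fun i => isOddV tc i && isEvI i) : Int) := by
            omega
          rw [hval, PySem.Int.floordiv_eq_ediv_of_pos (by norm_num),
              Int.mul_ediv_cancel_left _ (by norm_num : (2:Int) ≠ 0)]
      · rw [if_pos (by omega :
            2 * ((PySem.List.pyRange 0 n 1).countP (isOddV tc) : Int) - n ≠ 0),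
            if_pos (by omega :
            ((PySem.List.pyRange 0 n 1).countP (isOddV tc) : Int)
               ≠ n - ((PySem.List.pyRange 0 n 1).countP (isOddV tc) : Int))]
    · -- odd n
      have hn2 : n % 2 = 1 := by omega
      have ht2 : (n.toNat % 2 : Nat) = 1 := by omega
      rw [ht2] at hev; push_cast at hev
      rw [if_neg hm, if_neg hm,
          show ((PySem.List.pyRange 0 n 1).countP (isOddV tc) : Int)
              - (n - ((PySem.List.pyRange 0 n 1).countP (isOddV tc) : Int))
            = 2 * ((PySem.List.pyRange 0 n 1).countP (isOddV tc) : Int) - n from by ring]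
      by_cases habs : |2 * ((PySem.List.pyRange 0 n 1).countP (isOddV tc) : Int) - n| = 1
      · rw [if_neg (fun h => h habs), if_neg (fun h => h habs)]
        rcases (abs_eq (by norm_num : (0:Int) ≤ 1)).mp habs with hs1 | hs1
        · rw [if_pos (by omega :
              ((PySem.List.pyRange 0 n 1).countP (isOddV tc) : Int)
                > n - ((PySem.List.pyRange 0 n 1).countP (isOddV tc) : Int)),
              solveA_eq_mism n tc 1 (by
                rw [if_neg hm, sum_tmp tc (PySem.List.pyRange 0 n 1), hlenL,
                    if_pos (by omega)])]
          have h1 := mis_one tc (PySem.List.pyRange 0 n 1)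
          have hval : (((PySem.List.pyRange 0 n 1).filter
              (fun i => fsgn tc i ≠ (if PySem.Int.mod i 2 = 0 then (1:Int) else -1))).length : Int)
              = 2 * (((PySem.List.pyRange 0 n 1).countP (isOddV tc) : Int)
                  - ((PySem.List.pyRange 0 n 1).countP (fun i => isOddV tc i && isEvI i) : Int)) := by
            omega
          rw [hval, PySem.Int.floordiv_eq_ediv_of_pos (by norm_num),
              Int.mul_ediv_cancel_left _ (by norm_num : (2:Int) ≠ 0)]
        · rw [if_neg (by omega :
              ¬ (((PySem.List.pyRange 0 n 1).countP (isOddV tc) : Int)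
                > n - ((PySem.List.pyRange 0 n 1).countP (isOddV tc) : Int))),
              solveA_eq_mism n tc (-1) (by
                rw [if_neg hm, sum_tmp tc (PySem.List.pyRange 0 n 1), hlenL,
                    if_neg (by omega)])]
          simp only [neg_neg]
          have h1 := mis_negone tc (PySem.List.pyRange 0 n 1)
          have hval : (((PySem.List.pyRange 0 n 1).filter
              (fun i => fsgn tc i ≠ (if PySem.Int.mod i 2 = 0 then (-1:Int) else 1))).length : Int)
              = 2 * ((PySem.List.pyRange 0 n 1).countP (fun i => isOddV tc i && isEvI i) : Int) := by
            omega
          rw [hval, PySem.Int.floordiv_eq_ediv_of_pos (by norm_num),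
              Int.mul_ediv_cancel_left _ (by norm_num : (2:Int) ≠ 0)]
      · rw [if_pos habs, if_pos habs]
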